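-- pv_equiv track=rewrite | github.com/CupnPlateGames/wzmapcompiler | wzmapcompiler.py | get_cliff_type
-- ===== SOURCE A (Python) =====
-- default_flat_cliff_diff = 30
--
-- def get_cliff_type(tile_heights):
-- 	rotation = 0
-- 	min_height = min(tile_heights[0], tile_heights[1], tile_heights[2], tile_heights[3])
-- 	max_height = max(tile_heights[0], tile_heights[1], tile_heights[2], tile_heights[3])
-- 	height_diff = max_height - min_height
-- 	if height_diff <= default_flat_cliff_diff:
-- 		return ("flat", 0)
-- 	top = [0, 0, 0, 0]
-- 	for i in range(0,4):
-- 		if (tile_heights[i] > min_height + default_flat_cliff_diff):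
-- 			top[i] = 1
-- 	top_count = top[0] + top[1] + top[2] + top[3]
-- 	if top_count == 2:
-- 		if top[0] and top[1]:
-- 			return ("straight", 0)
-- 		if top[1] and top[2]:
-- 			return ("straight", 90)
-- 		if top[2] and top[3]:
-- 			return ("straight", 180)
-- 		if top[3] and top[0]:
-- 			return ("straight", 270)
-- 		else:
-- 			return ("straight", 90)
-- 	elif top_count == 1:
-- 		if top[0]:
-- 			return ("corner", 270)
-- 		if top[1]:
-- 			return ("corner", 0)
-- 		if top[2]:
-- 			return ("corner", 90)
-- 		else:
-- 			return ("corner", 180)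
-- 	elif top_count == 3:
-- 		if not top[0]:
-- 			return ("corner", 270)
-- 		if not top[1]:
-- 			return ("corner", 0)
-- 		if not top[2]:
-- 			return ("corner", 90)
-- 		else:
-- 			return ("corner", 180)
-- ===== SOURCE B (Python) =====
-- default_flat_cliff_diff = 30
--
-- def _classify(top, rot):
-- 	# Cliffs are rotation-symmetric: cyclically rotating the tile's corners
-- 	# rotates the answer by 90 degrees.  Recurse towards a base pattern.
-- 	if top == (True, True, False, False):
-- 		return ("straight", rot)
-- 	if top == (False, True, False, True) or top == (True, False, True, False):
-- 		return ("straight", 90)  # diagonal pattern is rotation-invariant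
-- 	if top == (False, True, False, False) or top == (True, False, True, True):
-- 		return ("corner", rot)
-- 	return _classify((top[1], top[2], top[3], top[0]), (rot + 90) % 360)
--
-- def get_cliff_type(tile_heights):
-- 	h = (tile_heights[0], tile_heights[1], tile_heights[2], tile_heights[3])
-- 	lo = min(h)
-- 	if max(h) - lo <= default_flat_cliff_diff:
-- 		return ("flat", 0)
-- 	return _classify(tuple(x > lo + default_flat_cliff_diff for x in h), 0)
-- ===== Notes on version B (the rewrite author's own statement) =====
-- stated objective: alternative
-- what changed: B replaces A's 0/1 flag array, hand-summed count and twelve-branch case enumeration by a recursion that exploits the tile's rotational symmetry: it cyclically rotates the 4-corner top/not-top pattern until it hits one of four base patterns, adding 90 degrees of rotation per step.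
import Mathlib
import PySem

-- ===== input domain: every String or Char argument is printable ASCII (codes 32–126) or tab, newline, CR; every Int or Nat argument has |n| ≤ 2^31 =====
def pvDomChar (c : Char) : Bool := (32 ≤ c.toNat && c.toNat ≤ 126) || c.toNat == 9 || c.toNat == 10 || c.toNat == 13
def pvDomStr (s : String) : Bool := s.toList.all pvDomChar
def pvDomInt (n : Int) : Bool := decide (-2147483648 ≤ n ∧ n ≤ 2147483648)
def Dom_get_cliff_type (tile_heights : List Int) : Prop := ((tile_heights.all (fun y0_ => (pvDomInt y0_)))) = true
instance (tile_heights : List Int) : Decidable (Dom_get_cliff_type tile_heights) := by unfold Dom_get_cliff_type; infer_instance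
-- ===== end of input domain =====

-- B classifies the cliff by rotational symmetry: it rotates the 4-corner pattern toward one of
-- four base patterns, adding 90° per rotation, instead of A's flag array and 12-branch chain
-- (objective: alternative decomposition, same cost).

-- ===== PORT A =====
-- literal transliteration of Source A; the four tile_heights[i] lookups via pyGet? (none = IndexError)
def get_cliff_type (tile_heights : List Int) : Option (String × Int) :=
  match PySem.List.pyGet? tile_heights 0, PySem.List.pyGet? tile_heights 1,
        PySem.List.pyGet? tile_heights 2, PySem.List.pyGet? tile_heights 3 with
  | some h0, some h1, some h2, some h3 =>
    let min_height := min (min (min h0 h1) h2) h3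
    let max_height := max (max (max h0 h1) h2) h3
    let height_diff := max_height - min_height
    if height_diff ≤ 30 then some ("flat", 0)
    else
      -- top[i] = 1 iff tile_heights[i] > min_height + 30
      let t0 : Int := if h0 > min_height + 30 then 1 else 0
      let t1 : Int := if h1 > min_height + 30 then 1 else 0
      let t2 : Int := if h2 > min_height + 30 then 1 else 0
      let t3 : Int := if h3 > min_height + 30 then 1 else 0
      let top_count := t0 + t1 + t2 + t3
      if top_count = 2 then
        if t0 = 1 ∧ t1 = 1 then some ("straight", 0)
        else if t1 = 1 ∧ t2 = 1 then some ("straight", 90)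
        else if t2 = 1 ∧ t3 = 1 then some ("straight", 180)
        else if t3 = 1 ∧ t0 = 1 then some ("straight", 270)
        else some ("straight", 90)
      else if top_count = 1 then
        if t0 = 1 then some ("corner", 270)
        else if t1 = 1 then some ("corner", 0)
        else if t2 = 1 then some ("corner", 90)
        else some ("corner", 180)
      else if top_count = 3 then
        if t0 = 0 then some ("corner", 270)
        else if t1 = 0 then some ("corner", 0)
        else if t2 = 0 then some ("corner", 90)
        else some ("corner", 180)
      else none  -- Python falls off the end (returns None); unreachable when len ≥ 4
  | _, _, _, _ => none

-- ===== PORT B =====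
-- literal transliteration of Source B's _classify; fuel bounds the recursion (the all-equal patterns,
-- unreachable from get_cliff_type_alt, would recurse forever in Python: none = RecursionError)
def pvClassify : Nat → (Bool × Bool × Bool × Bool) → Int → Option (String × Int)
  | 0, _, _ => none
  | fuel + 1, (a, b, c, d), rot =>
    if (a, b, c, d) = (true, true, false, false) then some ("straight", rot)
    else if (a, b, c, d) = (false, true, false, true) ∨ (a, b, c, d) = (true, false, true, false) then
      some ("straight", 90)  -- diagonal pattern is rotation-invariant
    else if (a, b, c, d) = (false, true, false, false) ∨ (a, b, c, d) = (true, false, true, true) then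
      some ("corner", rot)
    else pvClassify fuel (b, c, d, a) (PySem.Int.mod (rot + 90) 360)

def get_cliff_type_alt (tile_heights : List Int) : Option (String × Int) :=
  (PySem.List.pyGet? tile_heights 0).bind fun h0 =>
  (PySem.List.pyGet? tile_heights 1).bind fun h1 =>
  (PySem.List.pyGet? tile_heights 2).bind fun h2 =>
  (PySem.List.pyGet? tile_heights 3).bind fun h3 =>
    let lo := min (min (min h0 h1) h2) h3
    if max (max (max h0 h1) h2) h3 - lo ≤ 30 then some ("flat", 0)
    else pvClassify 4 (h0 > lo + 30, h1 > lo + 30, h2 > lo + 30, h3 > lo + 30) 0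

-- ===== PRECONDITION & SPEC =====
-- A indexes tile_heights[0..3]; on shorter lists it raises IndexError.
def Pre_get_cliff_type (tile_heights : List Int) : Prop := 4 ≤ tile_heights.length
instance (tile_heights : List Int) : Decidable (Pre_get_cliff_type tile_heights) := by
  unfold Pre_get_cliff_type; infer_instance
def pvWitness_get_cliff_type : List Int := [0, 10, 50, 20]

def Spec_get_cliff_type (tile_heights : List Int) (out : Option (String × Int)) : Prop := out = get_cliff_type_alt tile_heights
instance (tile_heights : List Int) (out : Option (String × Int)) : Decidable (Spec_get_cliff_type tile_heights out) := by unfold Spec_get_cliff_type; infer_instance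

-- ===== CLAIM (what is proved, stated in full; the proofs are below) =====
def Claim_equal_get_cliff_type : Prop := ∀ (tile_heights : List Int), Dom_get_cliff_type tile_heights → Pre_get_cliff_type tile_heights → Spec_get_cliff_type tile_heights (get_cliff_type tile_heights)

-- ===== LEMMAS AND PROOFS =====

-- ===== VERDICT (by name: the statement is the Claim_ definition above) =====
theorem get_cliff_type_spec : Claim_equal_get_cliff_type := by
  intro th _ hpre
  unfold Pre_get_cliff_type at hpre
  match th, hpre with
  | a :: b :: c :: d :: rest, _ =>
    unfold Spec_get_cliff_type get_cliff_type get_cliff_type_alt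
    have g0 : PySem.List.pyGet? (a :: b :: c :: d :: rest) 0 = some a := by simp [pysem]
    have g1 : PySem.List.pyGet? (a :: b :: c :: d :: rest) 1 = some b := by simp [pysem]
    have g2 : PySem.List.pyGet? (a :: b :: c :: d :: rest) 2 = some c := by simp [pysem]
    have g3 : PySem.List.pyGet? (a :: b :: c :: d :: rest) 3 = some d := by simp [pysem]
    rw [g0, g1, g2, g3]
    simp only [Option.bind_some]
    generalize min (min (min a b) c) d = m
    generalize max (max (max a b) c) d = M
    by_cases hflat : M - m ≤ 30
    · rw [if_pos hflat, if_pos hflat]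
    · rw [if_neg hflat, if_neg hflat]
      by_cases hta : m + 30 < a <;>
        by_cases htb : m + 30 < b <;>
          by_cases htc : m + 30 < c <;>
            by_cases htd : m + 30 < d <;>
              simp [hta, htb, htc, htd, pvClassify, PySem.Int.mod]
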